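-- pv_equiv track=rewrite | github.com/olleheugene/atcmder | terminal_widget.py | _find_word_boundaries
-- ===== SOURCE A (Python) =====
-- def _find_word_boundaries(text, col):
--     """Find the start and end of a word at the given column"""
--     if not text or col >= len(text):
--         return col, col
--
--     # Word characters: letters, numbers, underscore
--     import string
--     word_chars = string.ascii_letters + string.digits + '_'
--
--     # If clicked on non-word character, select just that character
--     if text[col] not in word_chars:
--         return col, col + 1
--
--     # Find start of word
--     start = col
--     while start > 0 and text[start - 1] in word_chars:
--         start -= 1
--
--     # Find end of word
--     end = col
--     while end < len(text) and text[end] in word_chars: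
--         end += 1
--
--     return start, end
-- ===== SOURCE B (Python) =====
-- import re
--
-- _WORD_RUN = re.compile(r'[A-Za-z0-9_]+')
--
-- def _find_word_boundaries(text, col):
--     """Find the start and end of a word at the given column"""
--     if not text or col >= len(text):
--         return col, col
--     if col < 0:
--         # out-of-range column: no word selection there
--         return col, col
--     for m in _WORD_RUN.finditer(text):
--         if m.start() <= col < m.end():
--             return m.start(), m.end()
--     return col, col + 1
-- ===== Notes on version B (the rewrite author's own statement) =====
-- stated objective: faster
-- what changed: Replaces A's two expand-around-col while loops by a re.finditer scan that enumerates all maximal [A-Za-z0-9_]+ runs and returns the span containing col; the run scan happens in the compiled regex engine instead of per-character Python string-membership loops.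
-- intended difference: On nonempty text with -len(text) <= col < 0, Python's negative indexing silently wraps and A returns spans built around the wrapped position (e.g. ('ab', -1) -> (-1, 2)); B returns (col, col), the intended 'no word at this column' answer it already gives for col >= len(text). — e.g. on _find_word_boundaries("ab", -1): A returns (-1, 2), B returns (-1, -1)
import Mathlib
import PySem

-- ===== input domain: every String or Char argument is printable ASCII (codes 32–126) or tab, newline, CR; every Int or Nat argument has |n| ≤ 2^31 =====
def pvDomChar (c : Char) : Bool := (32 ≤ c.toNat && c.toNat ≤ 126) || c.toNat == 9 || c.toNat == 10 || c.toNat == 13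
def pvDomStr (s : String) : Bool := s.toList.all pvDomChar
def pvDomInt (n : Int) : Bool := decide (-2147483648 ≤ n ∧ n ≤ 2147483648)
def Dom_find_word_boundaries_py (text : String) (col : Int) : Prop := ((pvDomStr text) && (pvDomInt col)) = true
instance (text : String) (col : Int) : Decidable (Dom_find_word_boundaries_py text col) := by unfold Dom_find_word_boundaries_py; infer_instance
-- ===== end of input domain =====

-- B replaces A's two expand-around-col while loops by one left-to-right scan that enumerates all
-- maximal word runs (as re.finditer does) and then locates the run containing col; on nonempty text
-- with a negative in-range col B intentionally returns (col, col) instead of A's wraparound values.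

-- ===== PORT A =====
-- word_chars = string.ascii_letters + string.digits + '_' ; membership test (shared by both ports:
-- B's regex class [A-Za-z0-9_] denotes the same character set)
def pvWordChar (c : Char) : Bool :=
  ("abcdefghijklmnopqrstuvwxyzABCDEFGHIJKLMNOPQRSTUVWXYZ0123456789_".toList).contains c

-- while start > 0 and text[start-1] in word_chars: start -= 1
def pvStartLoop (t : List Char) (start : Int) : Int :=
  if h : 0 < start ∧ ((PySem.List.pyGet? t (start - 1)).elim false pvWordChar) = true then
    pvStartLoop t (start - 1)
  else start
termination_by start.toNat
decreasing_by omega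

-- while end < len(text) and text[end] in word_chars: end += 1
def pvEndLoop (t : List Char) (e : Int) : Int :=
  if h : e < (t.length : Int) ∧ ((PySem.List.pyGet? t e).elim false pvWordChar) = true then
    pvEndLoop t (e + 1)
  else e
termination_by ((t.length : Int) - e).toNat
decreasing_by omega

def find_word_boundaries_py (text : String) (col : Int) : Int × Int :=
  let t := text.toList
  if t = [] ∨ (t.length : Int) ≤ col then (col, col)
  else
    match PySem.List.pyGet? t col with
    | none => (col, col)  -- IndexError in Python (nonempty text, col < -len): outside Pre_
    | some c =>
      if pvWordChar c = false then (col, col + 1)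
      else (pvStartLoop t col, pvEndLoop t col)

-- ===== PORT B =====
-- the list of spans of maximal [A-Za-z0-9_]+ runs, as re.finditer enumerates them; the state is the
-- start of the run currently being read (None between runs)
def pvSpansGo : List Char → Nat → Option Nat → List (Nat × Nat)
  | [], _, none => []
  | [], i, some s => [(s, i)]
  | c :: u, i, none =>
      if pvWordChar c then pvSpansGo u (i + 1) (some i) else pvSpansGo u (i + 1) none
  | c :: u, i, some s =>
      if pvWordChar c then pvSpansGo u (i + 1) (some s) else (s, i) :: pvSpansGo u (i + 1) none

def find_word_boundaries_py_alt (text : String) (col : Int) : Int × Int :=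
  let t := text.toList
  if t = [] ∨ (t.length : Int) ≤ col then (col, col)
  else if col < 0 then (col, col)
  else
    match (pvSpansGo t 0 none).find? (fun p => decide (p.1 ≤ col.toNat ∧ col.toNat < p.2)) with
    | some (s, e) => ((s : Int), (e : Int))
    | none => (col, col + 1)

-- ===== PRECONDITION & SPEC =====
-- Pre_ excludes exactly the inputs where Python A raises IndexError: nonempty text with col < -len(text).
def Pre_find_word_boundaries_py (text : String) (col : Int) : Prop :=
  text.toList = [] ∨ -(text.toList.length : Int) ≤ col
instance (text : String) (col : Int) : Decidable (Pre_find_word_boundaries_py text col) := by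
  unfold Pre_find_word_boundaries_py; infer_instance

def pvWitness_find_word_boundaries_py : String × Int := ("hello world", 2)

-- On nonempty text with -len(text) ≤ col < 0, A's Python negative indexing silently wraps and it
-- returns spans built around the wrapped position (e.g. ("ab", -1) ↦ (-1, 2)); B returns (col, col),
-- the intended "no word at this column" answer it already gives for col ≥ len(text).
def D_find_word_boundaries_py (text : String) (col : Int) : Prop :=
  text.toList ≠ [] ∧ -(text.toList.length : Int) ≤ col ∧ col < 0
instance (text : String) (col : Int) : Decidable (D_find_word_boundaries_py text col) := by
  unfold D_find_word_boundaries_py; infer_instance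

def Spec_find_word_boundaries_py (text : String) (col : Int) (out : Int × Int) : Prop :=
  ¬ D_find_word_boundaries_py text col → out = find_word_boundaries_py_alt text col
instance (text : String) (col : Int) (out : Int × Int) : Decidable (Spec_find_word_boundaries_py text col out) := by
  unfold Spec_find_word_boundaries_py; infer_instance

def pvDiffWitness_find_word_boundaries_py : String × Int := ("ab", -1)
def pvDiffWitnessOut_find_word_boundaries_py : (Int × Int) × (Int × Int) := ((-1, 2), (-1, -1))

-- ===== CLAIM (what is proved, stated in full; the proofs are below) =====
def Claim_unchanged_find_word_boundaries_py : Prop := ∀ (text : String) (col : Int), Dom_find_word_boundaries_py text col → Pre_find_word_boundaries_py text col → Spec_find_word_boundaries_py text col (find_word_boundaries_py text col)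
def Claim_changed_find_word_boundaries_py : Prop := Dom_find_word_boundaries_py (pvDiffWitness_find_word_boundaries_py.1) (pvDiffWitness_find_word_boundaries_py.2) ∧ Pre_find_word_boundaries_py (pvDiffWitness_find_word_boundaries_py.1) (pvDiffWitness_find_word_boundaries_py.2) ∧ D_find_word_boundaries_py (pvDiffWitness_find_word_boundaries_py.1) (pvDiffWitness_find_word_boundaries_py.2) ∧ find_word_boundaries_py (pvDiffWitness_find_word_boundaries_py.1) (pvDiffWitness_find_word_boundaries_py.2) = pvDiffWitnessOut_find_word_boundaries_py.1 ∧ find_word_boundaries_py_alt (pvDiffWitness_find_word_boundaries_py.1) (pvDiffWitness_find_word_boundaries_py.2) = pvDiffWitnessOut_find_word_boundaries_py.2 ∧ pvDiffWitnessOut_find_word_boundaries_py.1 ≠ pvDiffWitnessOut_find_word_boundaries_py.2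
def Claim_exact_find_word_boundaries_py : Prop := ∀ (text : String) (col : Int), Dom_find_word_boundaries_py text col → Pre_find_word_boundaries_py text col → D_find_word_boundaries_py text col → find_word_boundaries_py text col ≠ find_word_boundaries_py_alt text col

-- ===== LEMMAS AND PROOFS =====

-- "position k of t carries a word character" (false past the end)
def pvWAt (t : List Char) (k : Nat) : Bool := (t[k]?.elim false pvWordChar)

-- a maximal word run of t
def pvMaxRun (t : List Char) (a b : Nat) : Prop :=
  a < b ∧ (∀ k, a ≤ k → k < b → pvWAt t k = true) ∧
    (a = 0 ∨ pvWAt t (a - 1) = false) ∧ pvWAt t b = false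

theorem pvWAt_lt_length {t : List Char} {k : Nat} (h : pvWAt t k = true) : k < t.length := by
  by_contra hk
  simp [pvWAt, List.getElem?_eq_none (by omega : t.length ≤ k)] at h

theorem pvWAt_of_ge_length (t : List Char) {k : Nat} (h : t.length ≤ k) : pvWAt t k = false := by
  simp [pvWAt, List.getElem?_eq_none h]

-- spans soundness & completeness, both loop states at once
theorem pvSpansGo_mem (u : List Char) : ∀ (t : List Char) (i : Nat), t.drop i = u →
    ∀ a b : Nat,
      ((i = 0 ∨ pvWAt t (i - 1) = false) →
        ((a, b) ∈ pvSpansGo u i none ↔ pvMaxRun t a b ∧ i ≤ a)) ∧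
      (∀ s : Nat, s < i → (∀ k, s ≤ k → k < i → pvWAt t k = true) →
          (s = 0 ∨ pvWAt t (s - 1) = false) →
        ((a, b) ∈ pvSpansGo u i (some s) ↔ pvMaxRun t a b ∧ (a = s ∨ i ≤ a))) := by
  induction u with
  | nil =>
    intro t i hdrop a b
    have hlen : t.length ≤ i := by
      have := congrArg List.length hdrop; simp at this; omega
    constructor
    · intro _
      simp only [pvSpansGo, List.not_mem_nil, false_iff]
      rintro ⟨⟨_, hrun, _, _⟩, hia⟩
      have := pvWAt_lt_length (hrun a le_rfl (by omega))
      omega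
    · intro s hsi hrun hleft
      simp only [pvSpansGo, List.mem_singleton, Prod.mk.injEq]
      constructor
      · rintro ⟨rfl, rfl⟩
        refine ⟨⟨hsi, fun k h1 h2 => hrun k h1 h2, hleft, pvWAt_of_ge_length t hlen⟩, Or.inl rfl⟩
      · rintro ⟨⟨hab, hr, hl, hright⟩, hcase⟩
        have ha : a = s := by
          rcases hcase with h | h
          · exact h
          · exfalso
            have := pvWAt_lt_length (hr a le_rfl hab)
            omega
        subst ha
        refine ⟨rfl, ?_⟩
        rcases lt_trichotomy b i with hb | hb | hb
        · have := hrun b (by omega) hb; simp_all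
        · exact hb
        · have := hr i (by omega) hb
          rw [pvWAt_of_ge_length t hlen] at this; simp_all
  | cons c u' ih =>
    intro t i hdrop a b
    have hc : t[i]? = some c := by
      have h0 : (t.drop i)[0]? = some c := by rw [hdrop]; rfl
      rwa [List.getElem?_drop, Nat.add_zero] at h0
    have hWi : pvWAt t i = pvWordChar c := by simp [pvWAt, hc]
    have hdrop' : t.drop (i + 1) = u' := by
      have h1 : (t.drop i).drop 1 = u' := by rw [hdrop]; rfl
      rw [List.drop_drop] at h1
      exact h1
    constructor
    · intro hleft
      by_cases hW : pvWordChar c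
      · simp only [pvSpansGo, hW, if_pos]
        rw [(ih t (i + 1) hdrop' a b).2 i (by omega)
          (fun k h1 h2 => by rw [show k = i by omega, hWi]; exact hW) hleft]
        constructor
        · rintro ⟨hm, h⟩; exact ⟨hm, by omega⟩
        · rintro ⟨hm, h⟩
          refine ⟨hm, ?_⟩
          rcases Nat.lt_or_ge a (i + 1) with h' | h'
          · exact Or.inl (by omega)
          · exact Or.inr h'
      · simp only [pvSpansGo, hW, if_neg, Bool.false_eq_true, not_false_iff]
        rw [(ih t (i + 1) hdrop' a b).1 (Or.inr (by simpa [hWi] using hW))]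
        constructor
        · rintro ⟨hm, h⟩; exact ⟨hm, by omega⟩
        · rintro ⟨hm, h⟩
          refine ⟨hm, ?_⟩
          rcases Nat.eq_or_lt_of_le h with h' | h'
          · exfalso
            have := hm.2.1 a le_rfl hm.1
            rw [← h', hWi] at this; simp_all
          · omega
    · intro s hsi hrun hleftS
      by_cases hW : pvWordChar c
      · simp only [pvSpansGo, hW, if_pos]
        rw [(ih t (i + 1) hdrop' a b).2 s (by omega)
          (fun k h1 h2 => by
            rcases Nat.lt_or_ge k i with h' | h'
            · exact hrun k h1 h'
            · rw [show k = i by omega, hWi]; exact hW) hleftS]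
        constructor
        · rintro ⟨hm, h⟩
          refine ⟨hm, ?_⟩
          rcases h with h | h
          · exact Or.inl h
          · exact Or.inr (by omega)
        · rintro ⟨hm, h⟩
          refine ⟨hm, ?_⟩
          rcases h with h | h
          · exact Or.inl h
          · rcases Nat.eq_or_lt_of_le h with h' | h'
            · exfalso
              rcases hm.2.2.1 with h0 | h0
              · omega
              · have := hrun (a - 1) (by omega) (by omega)
                rw [← h'] at h0; simp_all
            · exact Or.inr h'
      · simp only [pvSpansGo, hW, if_neg, Bool.false_eq_true, not_false_iff, List.mem_cons,
          Prod.mk.injEq]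
        have hWiF : pvWAt t i = false := by simp [hWi, hW]
        rw [(ih t (i + 1) hdrop' a b).1 (Or.inr (by simpa using hWiF))]
        have hMsi : pvMaxRun t s i :=
          ⟨hsi, fun k h1 h2 => hrun k h1 h2, hleftS, hWiF⟩
        constructor
        · rintro (⟨rfl, rfl⟩ | ⟨hm, h⟩)
          · exact ⟨hMsi, Or.inl rfl⟩
          · exact ⟨hm, Or.inr (by omega)⟩
        · rintro ⟨hm, h⟩
          rcases h with rfl | h
          · left
            refine ⟨rfl, ?_⟩
            have hab := hm.1
            rcases lt_trichotomy b i with hb | hb | hb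
            · have := hrun b (by omega) hb
              have := hm.2.2.2; simp_all
            · exact hb
            · have := hm.2.1 i (by omega) hb; simp_all
          · rcases Nat.eq_or_lt_of_le h with h' | h'
            · exfalso
              have := hm.2.1 a le_rfl hm.1
              rw [← h', hWiF] at this; simp_all
            · exact Or.inr ⟨hm, h'⟩

-- the maximal run containing a position is unique
theorem pvMaxRun_not_lt {t : List Char} {a b a' b' n : Nat}
    (h : pvMaxRun t a b) (h' : pvMaxRun t a' b')
    (h1 : a ≤ n) (h2 : n < b) (h3 : a' ≤ n) : ¬ a < a' := by
  intro hlt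
  rcases h'.2.2.1 with h0 | h0
  · omega
  · have := h.2.1 (a' - 1) (by omega) (by omega)
    simp_all

theorem pvMaxRun_not_lt_end {t : List Char} {a b a' b' n : Nat}
    (h : pvMaxRun t a b) (h' : pvMaxRun t a' b')
    (h1 : a ≤ n) (h2 : n < b) (h3 : a' ≤ n) (h4 : n < b') (ha : a = a') : ¬ b < b' := by
  intro hlt
  have := h'.2.1 b (by omega) hlt
  have := h.2.2.2
  simp_all

theorem pvMaxRun_unique {t : List Char} {a b a' b' n : Nat}
    (h : pvMaxRun t a b) (h' : pvMaxRun t a' b')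
    (h1 : a ≤ n) (h2 : n < b) (h3 : a' ≤ n) (h4 : n < b') : a = a' ∧ b = b' := by
  have hA : a = a' := by
    have := pvMaxRun_not_lt h h' h1 h2 h3
    have := pvMaxRun_not_lt h' h h3 h4 h1
    omega
  refine ⟨hA, ?_⟩
  have := pvMaxRun_not_lt_end h h' h1 h2 h3 h4 hA
  have := pvMaxRun_not_lt_end h' h h3 h4 h1 h2 hA.symm
  omega

-- characterisation of A's backward loop
theorem pvStartLoop_spec (t : List Char) (c : Int) (hc : 0 ≤ c) :
    0 ≤ pvStartLoop t c ∧ pvStartLoop t c ≤ c ∧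
      (∀ k : Nat, pvStartLoop t c ≤ (k : Int) → (k : Int) < c → pvWAt t k = true) ∧
      (pvStartLoop t c = 0 ∨ pvWAt t ((pvStartLoop t c).toNat - 1) = false) := by
  revert hc
  induction c using pvStartLoop.induct (t := t) with
  | case1 c h ih =>
    intro hc
    rw [pvStartLoop, dif_pos h]
    obtain ⟨hpos, helim⟩ := h
    have hIH := ih (by omega)
    refine ⟨hIH.1, by omega, ?_, hIH.2.2.2⟩
    intro k hk1 hk2
    rcases lt_trichotomy ((k : Int)) (c - 1) with h' | h' | h'
    · exact hIH.2.2.1 k hk1 h'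
    · have hk : k = (c - 1).toNat := by omega
      rw [PySem.List.pyGet?_of_nonneg t (show (0:Int) ≤ c - 1 by omega)] at helim
      subst hk
      simpa [pvWAt] using helim
    · omega
  | case2 c h =>
    intro hc
    rw [pvStartLoop, dif_neg h]
    refine ⟨hc, le_rfl, fun k hk1 hk2 => by omega, ?_⟩
    rcases Int.lt_or_le 0 c with hpos | hle
    · right
      have helim : ((PySem.List.pyGet? t (c - 1)).elim false pvWordChar) = false := by
        rcases Bool.eq_false_or_eq_true ((PySem.List.pyGet? t (c - 1)).elim false pvWordChar)
          with h' | h'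
        · exact absurd ⟨hpos, h'⟩ h
        · exact h'
      rw [PySem.List.pyGet?_of_nonneg t (show (0:Int) ≤ c - 1 by omega)] at helim
      have : c.toNat - 1 = (c - 1).toNat := by omega
      rw [this]
      simpa [pvWAt] using helim
    · left; omega

-- characterisation of A's forward loop
theorem pvEndLoop_spec (t : List Char) (e : Int) (he : 0 ≤ e) (hle : e ≤ (t.length : Int)) :
    e ≤ pvEndLoop t e ∧ pvEndLoop t e ≤ (t.length : Int) ∧
      (∀ k : Nat, e ≤ (k : Int) → (k : Int) < pvEndLoop t e → pvWAt t k = true) ∧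
      pvWAt t (pvEndLoop t e).toNat = false := by
  revert he hle
  induction e using pvEndLoop.induct (t := t) with
  | case1 e h ih =>
    intro he hle
    rw [pvEndLoop, dif_pos h]
    obtain ⟨hlt, helim⟩ := h
    have hIH := ih (by omega) (by omega)
    refine ⟨by omega, hIH.2.1, ?_, hIH.2.2.2⟩
    intro k hk1 hk2
    rcases lt_trichotomy ((k : Int)) e with h' | h' | h'
    · omega
    · have hk : k = e.toNat := by omega
      rw [PySem.List.pyGet?_of_nonneg t he] at helim
      subst hk
      simpa [pvWAt] using helim
    · exact hIH.2.2.1 k (by omega) hk2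
  | case2 e h =>
    intro he hle
    rw [pvEndLoop, dif_neg h]
    refine ⟨le_rfl, hle, fun k hk1 hk2 => by omega, ?_⟩
    rcases Int.lt_or_le e (t.length : Int) with hlt | hge
    · have helim : ((PySem.List.pyGet? t e).elim false pvWordChar) = false := by
        rcases Bool.eq_false_or_eq_true ((PySem.List.pyGet? t e).elim false pvWordChar)
          with h' | h'
        · exact absurd ⟨hlt, h'⟩ h
        · exact h'
      rw [PySem.List.pyGet?_of_nonneg t he] at helim
      simpa [pvWAt] using helim
    · exact pvWAt_of_ge_length t (by omega)

theorem pvEndLoop_ge (t : List Char) (e : Int) : e ≤ pvEndLoop t e := by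
  induction e using pvEndLoop.induct (t := t) with
  | case1 e h ih => rw [pvEndLoop, dif_pos h]; omega
  | case2 e h => rw [pvEndLoop, dif_neg h]

-- ===== VERDICT (by name: the statement is the Claim_ definition above) =====
theorem find_word_boundaries_py_spec : Claim_unchanged_find_word_boundaries_py := by
  intro text col _ hpre
  unfold Spec_find_word_boundaries_py
  intro hnD
  unfold find_word_boundaries_py find_word_boundaries_py_alt
  set t := text.toList with ht
  by_cases hemp : t = []
  · simp [hemp]
  · by_cases hge : (t.length : Int) ≤ col
    · simp [hemp, hge]
    · have hlenpos : 0 < t.length := List.length_pos_iff.mpr hemp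
      have hpre' : -(t.length : Int) ≤ col := by
        rcases hpre with h | h
        · exact absurd h hemp
        · exact h
      have hnneg : 0 ≤ col := by
        by_contra hneg
        exact hnD ⟨hemp, hpre', by omega⟩
      simp only [hemp, hge, or_self, if_neg, not_false_iff]
      rw [if_neg (by omega : ¬ col < 0)]
      set n := col.toNat with hn
      have hcol : col = (n : Int) := by omega
      have hnlt : n < t.length := by omega
      have hget : PySem.List.pyGet? t col = some t[n] := by
        rw [hcol, PySem.List.pyGet?_natCast, List.getElem?_eq_getElem hnlt]
      rw [hget]
      have hmred : (match some t[n] with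
          | none => ((col, col) : Int × Int)
          | some c => if pvWordChar c = false then (col, col + 1)
              else (pvStartLoop t col, pvEndLoop t col)) =
          if pvWordChar t[n] = false then (col, col + 1)
          else (pvStartLoop t col, pvEndLoop t col) := rfl
      rw [hmred]
      have hWn : pvWAt t n = pvWordChar t[n] := by
        simp [pvWAt, List.getElem?_eq_getElem hnlt]
      by_cases hW : pvWordChar t[n]
      · -- word character: A's loops produce the maximal run; B finds the same run
        rw [if_neg (by simp [hW])]
        have hS := pvStartLoop_spec t col hnneg
        have hE := pvEndLoop_spec t col hnneg (by omega)
        set sI := pvStartLoop t col with hsI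
        set eI := pvEndLoop t col with heI
        have heGt : col < eI := by
          rcases Int.lt_or_le col eI with h | h
          · exact h
          · exfalso
            have : eI = col := by omega
            rw [this, hcol, Int.toNat_natCast] at hE
            rw [hWn] at hE
            simp [hW] at hE
        set sN := sI.toNat with hsN
        set eN := eI.toNat with heN
        have hsc : sI = (sN : Int) := by omega
        have hec : eI = (eN : Int) := by omega
        have hrun : pvMaxRun t sN eN := by
          refine ⟨by omega, ?_, ?_, ?_⟩
          · intro k h1 h2
            rcases Int.lt_or_le (k : Int) col with h' | h'
            · exact hS.2.2.1 k (by omega) h'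
            · exact hE.2.2.1 k h' (by omega)
          · rcases hS.2.2.2 with h' | h'
            · left; omega
            · right; exact h'
          · exact hE.2.2.2
        have hcontains : sN ≤ n ∧ n < eN := by omega
        -- B's find? must return exactly (sN, eN)
        have hmem : (sN, eN) ∈ pvSpansGo t 0 none :=
          ((pvSpansGo_mem t t 0 (by simp) sN eN).1 (Or.inl rfl)).mpr ⟨hrun, Nat.zero_le _⟩
        have hpred : (fun p : Nat × Nat => decide (p.1 ≤ n ∧ n < p.2)) (sN, eN)
            = true := by
          simp; omega
        rcases hfind : (pvSpansGo t 0 none).find?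
            (fun p => decide (p.1 ≤ n ∧ n < p.2)) with _ | ⟨a, b⟩
        · exfalso
          rw [List.find?_eq_none] at hfind
          exact absurd hpred (by simpa using hfind _ hmem)
        · have hmem' := List.mem_of_find?_eq_some hfind
          have hpred' := List.find?_some hfind
          simp only [decide_eq_true_eq] at hpred'
          have hrun' : pvMaxRun t a b :=
            (((pvSpansGo_mem t t 0 (by simp) a b).1 (Or.inl rfl)).mp hmem').1
          have huniq := pvMaxRun_unique hrun hrun' hcontains.1 hcontains.2
            (by omega) (by omega)
          rw [hfind]
          show (sI, eI) = ((a : Int), (b : Int))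
          rw [hsc, hec, huniq.1, huniq.2]
      · -- non-word character: no span contains col
        rw [if_pos (by simpa using hW)]
        have hnone : (pvSpansGo t 0 none).find?
            (fun p => decide (p.1 ≤ n ∧ n < p.2)) = none := by
          rw [List.find?_eq_none]
          rintro ⟨a, b⟩ hmem hpq
          simp only [decide_eq_true_eq] at hpq
          have hrun : pvMaxRun t a b :=
            (((pvSpansGo_mem t t 0 (by simp) a b).1 (Or.inl rfl)).mp hmem).1
          have := hrun.2.1 n hpq.1 hpq.2
          rw [hWn] at this
          exact hW this
        rw [hnone]

theorem find_word_boundaries_py_changed : Claim_changed_find_word_boundaries_py := by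
  unfold Claim_changed_find_word_boundaries_py
  have hE2 : pvEndLoop "ab".toList 2 = 2 := by
    rw [pvEndLoop, dif_neg (by decide)]
  have hE1 : pvEndLoop "ab".toList 1 = 2 := by
    rw [pvEndLoop, dif_pos (by decide)]; norm_num [hE2]
  have hE0 : pvEndLoop "ab".toList 0 = 2 := by
    rw [pvEndLoop, dif_pos (by decide)]; norm_num [hE1]
  have hEm : pvEndLoop "ab".toList (-1) = 2 := by
    rw [pvEndLoop, dif_pos (by decide)]; norm_num [hE0]
  have hS : pvStartLoop "ab".toList (-1) = -1 := by
    rw [pvStartLoop, dif_neg (by decide)]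
  refine ⟨by decide, by decide, by decide, ?_, by decide, by decide⟩
  show find_word_boundaries_py "ab" (-1) = ((-1 : Int), (2 : Int))
  unfold find_word_boundaries_py
  rw [if_neg (by decide)]
  have hg : PySem.List.pyGet? "ab".toList (-1) = some 'b' := by decide
  rw [hg]
  show (if pvWordChar 'b' = false then ((-1 : Int), (-1 : Int) + 1)
      else (pvStartLoop "ab".toList (-1), pvEndLoop "ab".toList (-1))) = ((-1 : Int), (2 : Int))
  rw [if_neg (by decide), hS, hEm]

theorem find_word_boundaries_py_tight : Claim_exact_find_word_boundaries_py := by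
  intro text col _ _ hD
  obtain ⟨hemp, hge, hneg⟩ := hD
  unfold find_word_boundaries_py find_word_boundaries_py_alt
  set t := text.toList with ht
  have hlenpos : 0 < t.length := List.length_pos_iff.mpr hemp
  have hnotge : ¬ (t.length : Int) ≤ col := by omega
  simp only [hemp, hnotge, or_self, if_neg, not_false_iff]
  rw [if_pos hneg]
  rcases hopt : PySem.List.pyGet? t col with _ | c
  · exfalso
    rw [PySem.List.pyGet?_eq_none_iff] at hopt
    exact hopt ⟨by omega, by omega⟩
  · have hmred : (match some c with
        | none => ((col, col) : Int × Int)
        | some c => if pvWordChar c = false then (col, col + 1)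
            else (pvStartLoop t col, pvEndLoop t col)) =
        if pvWordChar c = false then (col, col + 1)
        else (pvStartLoop t col, pvEndLoop t col) := rfl
    rw [hmred]
    by_cases hW : pvWordChar c
    · rw [if_neg (by simp [hW])]
      have hstep : pvEndLoop t col = pvEndLoop t (col + 1) := by
        rw [pvEndLoop]
        rw [dif_pos ⟨by omega, by simp [hopt, hW]⟩]
      have : col + 1 ≤ pvEndLoop t col := by
        rw [hstep]; exact pvEndLoop_ge t (col + 1)
      intro hEq
      have := congrArg Prod.snd hEq
      simp at this
      omega
    · rw [if_pos (by simpa using hW)]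
      intro hEq
      have := congrArg Prod.snd hEq
      simp at this
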